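-- pv_equiv track=rewrite | github.com/IvanKalug-QA/codewars | Correct_the_time_string.py | time_correct
-- ===== SOURCE A (Python) =====
-- def time_correct(t):
--     if t is None or t == "":
--         return t
--     if len(t) != 8 or t[2] != ':' or t[5] != ':':
--         return None
--     parts = t.split(':')
--     for part in parts:
--         if not part.isdigit():
--             return None
--     hours, minutes, seconds = map(int, parts)
--
--     if seconds >= 60:
--         minutes += seconds // 60
--         seconds = seconds % 60
--
--     if minutes >= 60:
--         hours += minutes // 60
--         minutes = minutes % 60
--
--     if hours >= 24:
--         hours = hours % 24
--
--     return f"{hours:02d}:{minutes:02d}:{seconds:02d}"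
-- ===== SOURCE B (Python) =====
-- def time_correct(t):
--     if t is None or t == "":
--         return t
--     if len(t) != 8:
--         return None
--     for i, ch in enumerate(t):
--         if i == 2 or i == 5:
--             if ch != ':':
--                 return None
--         elif not ch.isdigit():
--             return None
--     total = (int(t[0:2]) * 3600 + int(t[3:5]) * 60 + int(t[6:8])) % 86400
--     h, rem = divmod(total, 3600)
--     m, s = divmod(rem, 60)
--     return f"{h:02d}:{m:02d}:{s:02d}"
-- ===== Notes on version B (the rewrite author's own statement) =====
-- stated objective: simpler
-- what changed: B validates the string with a single positional character scan instead of colon-split plus per-part isdigit, and replaces A's three cascading carry branches by one closed-form conversion: total seconds mod 86400 split back with divmod.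
import Mathlib
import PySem

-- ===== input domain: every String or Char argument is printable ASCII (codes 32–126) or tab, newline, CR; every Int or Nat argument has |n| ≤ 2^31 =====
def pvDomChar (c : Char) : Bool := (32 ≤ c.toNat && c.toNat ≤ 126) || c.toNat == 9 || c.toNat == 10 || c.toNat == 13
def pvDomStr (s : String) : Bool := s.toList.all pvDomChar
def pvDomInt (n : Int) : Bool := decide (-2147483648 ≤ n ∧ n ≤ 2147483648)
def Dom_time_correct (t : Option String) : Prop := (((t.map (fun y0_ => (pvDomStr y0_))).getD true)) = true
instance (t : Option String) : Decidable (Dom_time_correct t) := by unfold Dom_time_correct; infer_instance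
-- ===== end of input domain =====

-- B replaces A's cascade of carry branches by one closed-form conversion through total
-- seconds (mod 86400) and validates the string with a single positional character scan
-- instead of split-and-check; objective: simpler. Return values agree everywhere.

-- ===== PORT A =====
-- literal transliteration of Source A: validation via len/t[2]/t[5] and split(':') + isdigit,
-- then three conditional carry steps; f"{x:02d}" for the nonnegative x reached here is
-- str(x).zfill(2) (exact for x ≥ 0, and every x formatted is ≥ 0 on the reached branch).
def time_correct (t : Option String) : Option String :=
  match t with
  | none => none                               -- `if t is None ...: return t`
  | some s =>
    if s == "" then some s                     -- `... or t == "": return t`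
    else if PySem.Str.len s ≠ 8 ∨ PySem.Chars.pyGet? s.toList 2 ≠ some ':' ∨
        PySem.Chars.pyGet? s.toList 5 ≠ some ':' then none
    else
      let parts := PySem.Chars.splitOn s.toList [':']
      if parts.all PySem.Chars.strIsdigit then
        -- `hours, minutes, seconds = map(int, parts)`: the guards above ensure exactly
        -- three parts, and int() on an all-digit string always succeeds (getD defaults
        -- are never used on reached inputs)
        let hours := (PySem.Int.ofChars? (parts.getD 0 [])).getD 0
        let minutes := (PySem.Int.ofChars? (parts.getD 1 [])).getD 0
        let seconds := (PySem.Int.ofChars? (parts.getD 2 [])).getD 0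
        let minutes1 := if 60 ≤ seconds then minutes + PySem.Int.floordiv seconds 60 else minutes
        let seconds1 := if 60 ≤ seconds then PySem.Int.mod seconds 60 else seconds
        let hours1 := if 60 ≤ minutes1 then hours + PySem.Int.floordiv minutes1 60 else hours
        let minutes2 := if 60 ≤ minutes1 then PySem.Int.mod minutes1 60 else minutes1
        let hours2 := if 24 ≤ hours1 then PySem.Int.mod hours1 24 else hours1
        some (String.ofList (PySem.Chars.join [':']
          [PySem.Chars.zfill (PySem.Int.toChars hours2) 2,
           PySem.Chars.zfill (PySem.Int.toChars minutes2) 2,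
           PySem.Chars.zfill (PySem.Int.toChars seconds1) 2]))
      else none

-- ===== PORT B =====
-- Source B's `for i, ch in enumerate(t)` positional scan (returns None on first bad char)
def timeAltScan : Nat → List Char → Bool
  | _, [] => true
  | i, ch :: rest =>
    (if i == 2 || i == 5 then ch == ':' else PySem.Chars.isdigit ch) && timeAltScan (i + 1) rest

-- literal transliteration of Source B: same prologue, one positional scan, then the
-- closed-form divmod conversion through total seconds mod 86400
def time_correct_alt (t : Option String) : Option String :=
  match t with
  | none => none
  | some s =>
    if s == "" then some s
    else if PySem.Str.len s ≠ 8 then none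
    else if !timeAltScan 0 s.toList then none
    else
      -- int() on the all-digit slices always succeeds (getD never used on reached inputs)
      let hours := (PySem.Int.ofChars? (PySem.List.slice s.toList (some 0) (some 2))).getD 0
      let minutes := (PySem.Int.ofChars? (PySem.List.slice s.toList (some 3) (some 5))).getD 0
      let seconds := (PySem.Int.ofChars? (PySem.List.slice s.toList (some 6) (some 8))).getD 0
      let total := PySem.Int.mod (hours * 3600 + minutes * 60 + seconds) 86400
      let h := PySem.Int.floordiv total 3600
      let rem := PySem.Int.mod total 3600
      let m := PySem.Int.floordiv rem 60
      let sec := PySem.Int.mod rem 60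
      some (String.ofList (PySem.Chars.join [':']
        [PySem.Chars.zfill (PySem.Int.toChars h) 2,
         PySem.Chars.zfill (PySem.Int.toChars m) 2,
         PySem.Chars.zfill (PySem.Int.toChars sec) 2]))

-- ===== PRECONDITION & SPEC =====
def Spec_time_correct (t : Option String) (out : Option String) : Prop := out = time_correct_alt t
instance (t : Option String) (out : Option String) : Decidable (Spec_time_correct t out) := by unfold Spec_time_correct; infer_instance

-- ===== CLAIM (what is proved, stated in full; the proofs are below) =====
def Claim_equal_time_correct : Prop := ∀ (t : Option String), Dom_time_correct t → Spec_time_correct t (time_correct t)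

-- ===== LEMMAS AND PROOFS =====
theorem pv_digit_not_space (c : Char) (h1 : PySem.Chars.isdigit c = true) :
    PySem.Int.isIntSpace c = false := by
  revert h1
  simp [PySem.Int.isIntSpace, PySem.Chars.isdigit, Char.le_def, Char.ext_iff,
    UInt32.le_iff_toNat_le, UInt32.ext_iff]
  omega

theorem pv_isdigit_colon : PySem.Chars.isdigit ':' = false := by decide

theorem pv_digit_ne_colon (c : Char) (h : PySem.Chars.isdigit c = true) : ¬(':' = c) := by
  rintro rfl; revert h; decide

theorem pv_bind_nonneg (X : Option ℕ) :
    0 ≤ (Option.map (fun n : ℤ => n) (do let a ← X; pure ((a : ℤ)))).getD 0 := by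
  cases X <;> simp

theorem pv_digit_head (c : Char) (h : PySem.Chars.isdigit c = true) :
    c = '0' ∨ c = '1' ∨ c = '2' ∨ c = '3' ∨ c = '4' ∨ c = '5' ∨ c = '6' ∨ c = '7' ∨ c = '8' ∨ c = '9' := by
  have h1 : 48 ≤ c.toNat ∧ c.toNat ≤ 57 := by
    revert h
    simp [PySem.Chars.isdigit, Char.le_def, UInt32.le_iff_toNat_le]
  obtain ⟨h1, h2⟩ := h1
  have hofn : Char.ofNat c.toNat = c := Char.ofNat_toNat c
  have hv : c.toNat = 48 ∨ c.toNat = 49 ∨ c.toNat = 50 ∨ c.toNat = 51 ∨ c.toNat = 52 ∨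
      c.toNat = 53 ∨ c.toNat = 54 ∨ c.toNat = 55 ∨ c.toNat = 56 ∨ c.toNat = 57 := by omega
  rcases hv with h'|h'|h'|h'|h'|h'|h'|h'|h'|h' <;> rw [← hofn, h'] <;> decide

theorem pv_two_digits_nonneg (a b : Char) (ha : PySem.Chars.isdigit a = true)
    (hb : PySem.Chars.isdigit b = true) :
    0 ≤ (PySem.Int.ofChars? [a, b]).getD 0 := by
  have hspl : (List.dropWhile PySem.Int.isIntSpace
      (List.dropWhile PySem.Int.isIntSpace [a, b]).reverse).reverse = [a, b] := by
    rw [List.dropWhile_cons_of_neg (by simp [pv_digit_not_space a ha])]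
    simp only [List.reverse_cons, List.reverse_nil, List.nil_append, List.cons_append]
    rw [List.dropWhile_cons_of_neg (by simp [pv_digit_not_space b hb])]
    rfl
  rcases pv_digit_head a ha with h|h|h|h|h|h|h|h|h|h <;> subst h <;>
    (unfold PySem.Int.ofChars?; rw [hspl]; simp only []; split
     · rename_i heq; simp at heq
     · rename_i heq; simp at heq
     · exact pv_bind_nonneg _)

theorem pv_splitOn_digits (a b d e g h : Char) (ha : ¬(':' = a)) (hb : ¬(':' = b))
    (hd : ¬(':' = d)) (he : ¬(':' = e)) (hg : ¬(':' = g)) (hh : ¬(':' = h)) :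
    PySem.Chars.splitOn [a, b, ':', d, e, ':', g, h] [':'] = [[a, b], [d, e], [g, h]] := by
  simp [PySem.Chars.splitOn, PySem.Chars.splitOn.go, ha, hb, hd, he, hg, hh]

set_option maxHeartbeats 1600000 in
theorem pv_parts_all_iff (a b d e g h : Char) :
    ((PySem.Chars.splitOn [a, b, ':', d, e, ':', g, h] [':']).all PySem.Chars.strIsdigit = true) ↔
      (PySem.Chars.isdigit a = true ∧ PySem.Chars.isdigit b = true ∧
       PySem.Chars.isdigit d = true ∧ PySem.Chars.isdigit e = true ∧
       PySem.Chars.isdigit g = true ∧ PySem.Chars.isdigit h = true) := by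
  simp [PySem.Chars.splitOn, PySem.Chars.splitOn.go]
  split_ifs <;> simp_all [PySem.Chars.strIsdigit] <;>
    first
      | (intros; subst_vars; simp_all [pv_isdigit_colon])
      | tauto

theorem pv_arith (H M S : ℤ) (hH : 0 ≤ H) (hM : 0 ≤ M) (hS : 0 ≤ S) :
    ((if 24 ≤ (if 60 ≤ (if 60 ≤ S then M + PySem.Int.floordiv S 60 else M) then H + PySem.Int.floordiv (if 60 ≤ S then M + PySem.Int.floordiv S 60 else M) 60 else H)
      then PySem.Int.mod (if 60 ≤ (if 60 ≤ S then M + PySem.Int.floordiv S 60 else M) then H + PySem.Int.floordiv (if 60 ≤ S then M + PySem.Int.floordiv S 60 else M) 60 else H) 24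
      else (if 60 ≤ (if 60 ≤ S then M + PySem.Int.floordiv S 60 else M) then H + PySem.Int.floordiv (if 60 ≤ S then M + PySem.Int.floordiv S 60 else M) 60 else H))
       = PySem.Int.floordiv (PySem.Int.mod (H * 3600 + M * 60 + S) 86400) 3600) ∧
    ((if 60 ≤ (if 60 ≤ S then M + PySem.Int.floordiv S 60 else M) then PySem.Int.mod (if 60 ≤ S then M + PySem.Int.floordiv S 60 else M) 60 else (if 60 ≤ S then M + PySem.Int.floordiv S 60 else M))
       = PySem.Int.floordiv (PySem.Int.mod (PySem.Int.mod (H * 3600 + M * 60 + S) 86400) 3600) 60) ∧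
    ((if 60 ≤ S then PySem.Int.mod S 60 else S)
       = PySem.Int.mod (PySem.Int.mod (PySem.Int.mod (H * 3600 + M * 60 + S) 86400) 3600) 60) := by
  simp only [PySem.Int.floordiv, PySem.Int.mod, Int.fdiv_eq_ediv, Int.fmod_eq_emod]
  norm_num
  refine ⟨?_, ?_, ?_⟩ <;> split_ifs <;> omega

theorem pv_scan_iff (a b c d e f g h' : Char) :
    timeAltScan 0 [a, b, c, d, e, f, g, h'] = true ↔
      (c = ':' ∧ f = ':' ∧ PySem.Chars.isdigit a = true ∧ PySem.Chars.isdigit b = true ∧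
       PySem.Chars.isdigit d = true ∧ PySem.Chars.isdigit e = true ∧
       PySem.Chars.isdigit g = true ∧ PySem.Chars.isdigit h' = true) := by
  simp [timeAltScan]
  tauto

theorem pv_list_len8 {α : Type} (l : List α) (hl : l.length = 8) :
    ∃ a b c d e f g h', l = [a, b, c, d, e, f, g, h'] := by
  obtain ⟨a, l, rfl⟩ := List.exists_of_length_succ l (by simpa using hl)
  replace hl : l.length = 7 := by simpa using hl
  obtain ⟨b, l, rfl⟩ := List.exists_of_length_succ l hl
  replace hl : l.length = 6 := by simpa using hl
  obtain ⟨c, l, rfl⟩ := List.exists_of_length_succ l hl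
  replace hl : l.length = 5 := by simpa using hl
  obtain ⟨d, l, rfl⟩ := List.exists_of_length_succ l hl
  replace hl : l.length = 4 := by simpa using hl
  obtain ⟨e, l, rfl⟩ := List.exists_of_length_succ l hl
  replace hl : l.length = 3 := by simpa using hl
  obtain ⟨f, l, rfl⟩ := List.exists_of_length_succ l hl
  replace hl : l.length = 2 := by simpa using hl
  obtain ⟨g, l, rfl⟩ := List.exists_of_length_succ l hl
  replace hl : l.length = 1 := by simpa using hl
  obtain ⟨h', l, rfl⟩ := List.exists_of_length_succ l hl
  replace hl : l.length = 0 := by simpa using hl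
  rw [List.length_eq_zero_iff.mp hl]
  exact ⟨a, b, c, d, e, f, g, h', rfl⟩

-- ===== VERDICT (by name: the statement is the Claim_ definition above) =====
theorem time_correct_spec : Claim_equal_time_correct := by
  intro t _
  unfold Spec_time_correct
  cases t with
  | none => rfl
  | some s =>
    simp only [time_correct, time_correct_alt]
    by_cases hE : (s == "") = true
    · simp [hE]
    · simp only [hE, Bool.false_eq_true, if_false]
      by_cases h8 : PySem.Str.len s = 8
      · have hlen : s.toList.length = 8 := by
          have h8' := h8
          rw [PySem.Str.len_eq] at h8'
          exact_mod_cast h8'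
        obtain ⟨a, b, c, d, e, f, g, h', hcs⟩ := pv_list_len8 s.toList hlen
        rw [hcs]
        by_cases hc : c = ':'
        · by_cases hf : f = ':'
          · subst hc; subst hf
            by_cases Hd : (PySem.Chars.isdigit a = true ∧ PySem.Chars.isdigit b = true ∧
                PySem.Chars.isdigit d = true ∧ PySem.Chars.isdigit e = true ∧
                PySem.Chars.isdigit g = true ∧ PySem.Chars.isdigit h' = true)
            · obtain ⟨ha, hb, hd, he, hg, hh⟩ := Hd
              have hsplit := pv_splitOn_digits a b d e g h' (pv_digit_ne_colon a ha)
                (pv_digit_ne_colon b hb) (pv_digit_ne_colon d hd) (pv_digit_ne_colon e he)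
                (pv_digit_ne_colon g hg) (pv_digit_ne_colon h' hh)
              have hscan : timeAltScan 0 [a, b, ':', d, e, ':', g, h'] = true := by
                rw [pv_scan_iff]; exact ⟨rfl, rfl, ha, hb, hd, he, hg, hh⟩
              have hall : (PySem.Chars.splitOn [a, b, ':', d, e, ':', g, h'] [':']).all
                  PySem.Chars.strIsdigit = true := by
                rw [pv_parts_all_iff]; exact ⟨ha, hb, hd, he, hg, hh⟩
              rw [hsplit]
              rw [if_neg (by rintro (hx | hx | hx); exacts [hx h8, hx rfl, hx rfl])]
              rw [if_pos (by simp [PySem.Chars.strIsdigit, ha, hb, hd, he, hg, hh])]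
              rw [if_neg (not_not_intro h8), hscan]
              simp only [Bool.not_true, Bool.false_eq_true, if_false,
                show ([[a, b], [d, e], [g, h']].getD 0 ([] : List Char)) = [a, b] from rfl,
                show ([[a, b], [d, e], [g, h']].getD 1 ([] : List Char)) = [d, e] from rfl,
                show ([[a, b], [d, e], [g, h']].getD 2 ([] : List Char)) = [g, h'] from rfl,
                show PySem.List.slice [a, b, ':', d, e, ':', g, h'] (some 0) (some 2) = [a, b] from rfl,
                show PySem.List.slice [a, b, ':', d, e, ':', g, h'] (some 3) (some 5) = [d, e] from rfl,
                show PySem.List.slice [a, b, ':', d, e, ':', g, h'] (some 6) (some 8) = [g, h'] from rfl]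
              obtain ⟨A1, A2, A3⟩ := pv_arith ((PySem.Int.ofChars? [a, b]).getD 0)
                ((PySem.Int.ofChars? [d, e]).getD 0) ((PySem.Int.ofChars? [g, h']).getD 0)
                (pv_two_digits_nonneg a b ha hb) (pv_two_digits_nonneg d e hd he)
                (pv_two_digits_nonneg g h' hg hh)
              rw [A1, A2, A3]
            · have hscan : timeAltScan 0 [a, b, ':', d, e, ':', g, h'] = false := by
                rw [Bool.eq_false_iff, Ne, pv_scan_iff]
                intro hx; exact Hd ⟨hx.2.2.1, hx.2.2.2.1, hx.2.2.2.2.1, hx.2.2.2.2.2.1,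
                  hx.2.2.2.2.2.2.1, hx.2.2.2.2.2.2.2⟩
              have hall : (PySem.Chars.splitOn [a, b, ':', d, e, ':', g, h'] [':']).all
                  PySem.Chars.strIsdigit = false := by
                rw [Bool.eq_false_iff, Ne, pv_parts_all_iff]; exact Hd
              simp [hall, hscan]
          · have hscan : timeAltScan 0 [a, b, c, d, e, f, g, h'] = false := by
              rw [Bool.eq_false_iff, Ne, pv_scan_iff]
              intro hx; exact hf hx.2.1
            simp [hscan]
            intro _ _ h5
            exact absurd h5 hf
        · have hscan : timeAltScan 0 [a, b, c, d, e, f, g, h'] = false := by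
            rw [Bool.eq_false_iff, Ne, pv_scan_iff]
            intro hx; exact hc hx.1
          simp [hscan]
          intro _ h2
          exact absurd h2 hc
      · rw [if_pos (Or.inl h8), if_pos h8]
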